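-- pv_equiv track=rewrite | github.com/popoiopo/Heuristieken | end_result/functions_and_parameters/functions_team_datanose.py | duplicate_student
-- ===== SOURCE A (Python) =====
-- def duplicate_student(time_table):
-- 	counter_minus = 0
-- 	for day in time_table.keys():
-- 		for timeslot in time_table[day].keys():
-- 			student_check=[]
-- 			for classroom in time_table[day][timeslot].keys():
-- 				for course in time_table[day][timeslot][classroom].keys():
-- 					for student in time_table[day][timeslot][classroom][course]:
-- 						if student in student_check:
-- 							counter_minus-=1
-- 						else:
-- 							student_check.append(student)
-- 	return(counter_minus)
-- ===== SOURCE B (Python) =====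
-- def duplicate_student(time_table):
-- 	counter_minus = 0
-- 	for day_map in time_table.values():
-- 		for slot_map in day_map.values():
-- 			occurrences = [student
-- 			               for room in slot_map.values()
-- 			               for students in room.values()
-- 			               for student in students]
-- 			counter_minus -= len(occurrences) - len(set(occurrences))
-- 	return counter_minus
-- ===== Notes on version B (the rewrite author's own statement) =====
-- stated objective: faster
-- what changed: Per timeslot, B flattens all student occurrences across classrooms and courses into one list and subtracts len(occurrences) - len(set(occurrences)) in a batch, eliminating A's per-student linear 'seen-before' membership scan and its conditional branch.
import Mathlib
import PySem

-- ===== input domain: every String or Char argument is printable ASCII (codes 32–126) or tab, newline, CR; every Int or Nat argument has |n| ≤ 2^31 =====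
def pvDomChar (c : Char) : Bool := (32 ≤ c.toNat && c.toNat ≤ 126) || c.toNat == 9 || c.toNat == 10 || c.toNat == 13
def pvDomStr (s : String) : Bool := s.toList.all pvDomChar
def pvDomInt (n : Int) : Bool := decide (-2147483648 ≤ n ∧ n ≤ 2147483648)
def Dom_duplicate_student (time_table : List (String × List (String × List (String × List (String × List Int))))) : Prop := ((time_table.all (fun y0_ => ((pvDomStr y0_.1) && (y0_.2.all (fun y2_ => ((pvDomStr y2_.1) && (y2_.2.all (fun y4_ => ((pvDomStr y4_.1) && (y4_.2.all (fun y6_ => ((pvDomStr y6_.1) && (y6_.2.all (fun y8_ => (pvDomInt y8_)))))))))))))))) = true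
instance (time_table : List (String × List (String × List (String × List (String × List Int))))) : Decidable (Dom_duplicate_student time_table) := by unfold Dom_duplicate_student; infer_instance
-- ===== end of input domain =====

-- B replaces A's per-student 'seen before' membership scan by a per-timeslot batch count
-- (flatten the slot's occurrences, subtract len(occ) - len(set(occ))): asymptotically faster per slot.

-- ===== PORT A =====
-- Python iterates dict keys and indexes the dict by each key: ported as the key list
-- (map of firsts) with first-match lookup (List.lookup), exact for nodup-key association lists.
def duplicate_student (time_table : List (String × List (String × List (String × List (String × List Int))))) : Int :=
  (time_table.map (·.1)).foldl (fun counter_minus day =>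
    let dayv := ((List.lookup day time_table).getD [])
    (dayv.map (·.1)).foldl (fun counter_minus timeslot =>
      let slotv := ((List.lookup timeslot dayv).getD [])
      -- student_check = [] ; then the classroom/course/student loops threading (student_check, counter)
      ((slotv.map (·.1)).foldl (fun st classroom =>
        let roomv := ((List.lookup classroom slotv).getD [])
        (roomv.map (·.1)).foldl (fun st course =>
          let students := ((List.lookup course roomv).getD [])
          students.foldl (fun st student =>
            if student ∈ st.1 then (st.1, st.2 - 1) else (st.1 ++ [student], st.2)) st) st)
        (([] : List Int), counter_minus)).2) counter_minus) 0

-- ===== PORT B =====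
def duplicate_student_alt (time_table : List (String × List (String × List (String × List (String × List Int))))) : Int :=
  time_table.foldl (fun counter_minus day_map =>
    day_map.2.foldl (fun counter_minus slot_map =>
      let occurrences := slot_map.2.flatMap (fun room => room.2.flatMap (fun course => course.2))
      counter_minus - ((occurrences.length : Int) - ((PySem.Set.ofList occurrences).length : Int)))
      counter_minus) 0

-- ===== PRECONDITION & SPEC =====
-- Pre_ excludes association lists with duplicate keys at some nesting level: those cannot arise
-- from a Python dict, and on them key-iteration with first-match lookup (A) and direct pair
-- iteration (B) are both accidental readings of the input.
def Pre_duplicate_student (time_table : List (String × List (String × List (String × List (String × List Int))))) : Prop :=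
  (time_table.map (·.1)).Nodup ∧ ∀ d ∈ time_table, (d.2.map (·.1)).Nodup ∧
    ∀ s ∈ d.2, (s.2.map (·.1)).Nodup ∧ ∀ r ∈ s.2, (r.2.map (·.1)).Nodup
instance (time_table : List (String × List (String × List (String × List (String × List Int))))) : Decidable (Pre_duplicate_student time_table) := by unfold Pre_duplicate_student; infer_instance

def pvWitness_duplicate_student : (List (String × List (String × List (String × List (String × List Int))))) :=
  [("mon", [("9am", [("A1", [("math", [1, 2, 1]), ("bio", [2, 3])])])])]

def Spec_duplicate_student (time_table : List (String × List (String × List (String × List (String × List Int))))) (out : Int) : Prop := out = duplicate_student_alt time_table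
instance (time_table : List (String × List (String × List (String × List (String × List Int))))) (out : Int) : Decidable (Spec_duplicate_student time_table out) := by unfold Spec_duplicate_student; infer_instance

-- ===== CLAIM (what is proved, stated in full; the proofs are below) =====
def Claim_equal_duplicate_student : Prop := ∀ (time_table : List (String × List (String × List (String × List (String × List Int))))), Dom_duplicate_student time_table → Pre_duplicate_student time_table → Spec_duplicate_student time_table (duplicate_student time_table)

-- ===== LEMMAS AND PROOFS =====

-- First-match lookup of a key that belongs to a nodup-key association list finds its own value.
theorem pv_lookup_mem {ν : Type} {l : List (String × ν)} {p : String × ν}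
    (hnd : (l.map (·.1)).Nodup) (hp : p ∈ l) : List.lookup p.1 l = some p.2 := by
  induction l with
  | nil => cases hp
  | cons hd tl ih =>
    obtain ⟨k, v⟩ := hd
    simp only [List.map_cons, List.nodup_cons] at hnd
    rcases List.mem_cons.mp hp with rfl | hp'
    · exact List.lookup_cons_self
    · have hne : (p.1 == k) = false :=
        beq_eq_false_iff_ne.mpr (fun hEq => hnd.1 (hEq ▸ List.mem_map_of_mem hp'))
      simp [List.lookup, hne, ih hnd.2 hp']

-- A's seen/counter loop over a flat occurrence list, in closed form.
theorem pv_inner (occ : List Int) : ∀ (seen : List Int) (c : Int),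
    (occ.foldl (fun st s => if s ∈ st.1 then (st.1, st.2 - 1) else (st.1 ++ [s], st.2))
      (seen, c)).2
      = c - (occ.length : Int) + (((occ.foldl PySem.Set.add seen).length : Int) - (seen.length : Int)) := by
  induction occ with
  | nil => intro seen c; simp
  | cons s rest ih =>
    intro seen c
    by_cases hmem : s ∈ seen
    · simp only [List.foldl_cons, if_pos hmem, PySem.Set.add_of_mem hmem, ih,
        List.length_cons]
      push_cast; ring
    · simp only [List.foldl_cons, if_neg hmem, PySem.Set.add_of_not_mem hmem, ih,
        List.length_cons, List.length_append, List.length_nil]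
      push_cast; ring

theorem duplicate_student_spec : Claim_equal_duplicate_student := by
  intro tt _hdom hpre
  unfold Spec_duplicate_student duplicate_student duplicate_student_alt
  obtain ⟨hnd0, hrest⟩ := hpre
  simp only [List.foldl_map]
  apply PySem.List.foldl_congr_mem
  intro c d hd
  rw [pv_lookup_mem hnd0 hd, Option.getD_some]
  obtain ⟨hnd1, hrest1⟩ := hrest d hd
  apply PySem.List.foldl_congr_mem
  intro c s hs
  rw [pv_lookup_mem hnd1 hs, Option.getD_some]
  obtain ⟨hnd2, hrest2⟩ := hrest1 s hs
  -- replace the remaining lookups by the pairs' own values (nodup keys)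
  have hA : List.foldl (fun (st : List Int × Int) (r : String × List (String × List Int)) =>
        List.foldl (fun st course =>
          List.foldl (fun st student =>
            if student ∈ st.1 then (st.1, st.2 - 1) else (st.1 ++ [student], st.2)) st
            ((List.lookup course.1 ((List.lookup r.1 s.2).getD [])).getD []))
          st ((List.lookup r.1 s.2).getD []))
        (([] : List Int), c) s.2
      = List.foldl (fun (st : List Int × Int) (r : String × List (String × List Int)) =>
          List.foldl (fun st course =>
            List.foldl (fun st student =>
              if student ∈ st.1 then (st.1, st.2 - 1) else (st.1 ++ [student], st.2)) st
              course.2) st r.2) (([] : List Int), c) s.2 := by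
    apply PySem.List.foldl_congr_mem
    intro st r hr
    rw [pv_lookup_mem hnd2 hr, Option.getD_some]
    apply PySem.List.foldl_congr_mem
    intro st course hcourse
    rw [pv_lookup_mem (hrest2 r hr) hcourse, Option.getD_some]
  -- the nested loops over classrooms/courses/students are one loop over the flattened list
  have hflat : List.foldl (fun (st : List Int × Int) (r : String × List (String × List Int)) =>
        List.foldl (fun st course =>
          List.foldl (fun st student =>
            if student ∈ st.1 then (st.1, st.2 - 1) else (st.1 ++ [student], st.2)) st
            course.2) st r.2) (([] : List Int), c) s.2
      = (s.2.flatMap (fun room => room.2.flatMap (fun course => course.2))).foldl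
          (fun st student => if student ∈ st.1 then (st.1, st.2 - 1) else (st.1 ++ [student], st.2))
          (([] : List Int), c) := by
    rw [List.foldl_flatMap]
    apply PySem.List.foldl_congr_mem
    intro st r hr
    rw [List.foldl_flatMap]
  rw [hA, hflat, pv_inner]
  simp only [PySem.Set.ofList_eq_foldl, List.length_nil]
  push_cast; ring
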